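-- pv_equiv track=rewrite | github.com/VenkataSriSaiSuryaMandava/LeetCode-Solutions | 3917-count-indices-with-opposite-parity/3917-count-indices-with-opposite-parity.py | countOppositeParity
-- ===== SOURCE A (Python) =====
-- def countOppositeParity(nums):
--     """
--     :type nums: List[int]
--     :rtype: List[int]
--     """
--     n = len(nums)
--     res = [0] * n
--
--     even_count = 0
--     odd_count = 0
--
--     for i in range(n - 1, -1, -1):
--         if nums[i] % 2:
--             res[i] = even_count
--             odd_count += 1
--         else:
--             res[i] = odd_count
--             even_count += 1
--
--     return res
-- ===== SOURCE B (Python) =====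
-- def countOppositeParity(nums):
--     total_even = sum(1 for x in nums if x % 2 == 0)
--     total_odd = len(nums) - total_even
--     res = []
--     even_prefix = 0
--     odd_prefix = 0
--     for x in nums:
--         if x % 2:
--             res.append(total_even - even_prefix)
--             odd_prefix += 1
--         else:
--             res.append(total_odd - odd_prefix)
--             even_prefix += 1
--     return res
-- ===== Notes on version B (the rewrite author's own statement) =====
-- stated objective: alternative
-- what changed: Replaced the single backward suffix-counting pass with a totals pass plus a forward pass keeping exclusive prefix counts, computing each entry as total minus prefix.
import Mathlib
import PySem

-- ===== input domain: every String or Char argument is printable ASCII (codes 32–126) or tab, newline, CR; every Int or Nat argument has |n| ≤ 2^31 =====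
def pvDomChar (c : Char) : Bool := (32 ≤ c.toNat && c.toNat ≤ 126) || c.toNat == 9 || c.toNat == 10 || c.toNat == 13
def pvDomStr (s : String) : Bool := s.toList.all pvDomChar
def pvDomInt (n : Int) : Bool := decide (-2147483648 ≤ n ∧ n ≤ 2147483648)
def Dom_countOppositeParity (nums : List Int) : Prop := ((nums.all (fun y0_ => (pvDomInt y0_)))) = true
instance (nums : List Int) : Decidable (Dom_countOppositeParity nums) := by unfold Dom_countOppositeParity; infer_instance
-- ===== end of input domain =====

-- B replaces A's single backward suffix pass with a totals pass plus a forward prefix pass (return value only; A mutates nothing observable).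
-- ===== PORT A =====
-- backward loop of A as structural recursion from the right: state = (res, even_count, odd_count)
def goA : List Int → (List Int × Int × Int)
  | [] => ([], 0, 0)
  | x :: xs =>
    let (r, e, o) := goA xs
    if PySem.Int.mod x 2 ≠ 0 then (e :: r, e, o + 1) else (o :: r, e + 1, o)

def countOppositeParity (nums : List Int) : List Int := (goA nums).1

-- ===== PORT B =====
-- forward pass with exclusive prefix counters e (evens seen) and o (odds seen)
def goB (tE tO : Int) : List Int → Int → Int → List Int
  | [], _, _ => []
  | x :: xs, e, o =>
    if PySem.Int.mod x 2 ≠ 0 then (tE - e) :: goB tE tO xs e (o + 1)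
    else (tO - o) :: goB tE tO xs (e + 1) o

def countOppositeParity_alt (nums : List Int) : List Int :=
  let totalEven := nums.foldl (fun acc x => if PySem.Int.mod x 2 = 0 then acc + 1 else acc) (0 : Int)
  let totalOdd := (nums.length : Int) - totalEven
  goB totalEven totalOdd nums 0 0

-- ===== PRECONDITION & SPEC =====
def Spec_countOppositeParity (nums : List Int) (out : List Int) : Prop := out = countOppositeParity_alt nums
instance (nums : List Int) (out : List Int) : Decidable (Spec_countOppositeParity nums out) := by unfold Spec_countOppositeParity; infer_instance

-- ===== CLAIM (what is proved, stated in full; the proofs are below) =====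
def Claim_equal_countOppositeParity : Prop := ∀ (nums : List Int), Dom_countOppositeParity nums → Spec_countOppositeParity nums (countOppositeParity nums)

-- ===== LEMMAS AND PROOFS =====
def cntE : List Int → Int
  | [] => 0
  | x :: xs => (if PySem.Int.mod x 2 = 0 then 1 else 0) + cntE xs

def cntO : List Int → Int
  | [] => 0
  | x :: xs => (if PySem.Int.mod x 2 ≠ 0 then 1 else 0) + cntO xs

lemma goA_counts (xs : List Int) : (goA xs).2.1 = cntE xs ∧ (goA xs).2.2 = cntO xs := by
  induction xs with
  | nil => exact ⟨rfl, rfl⟩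
  | cons x xs ih =>
    show ((let p := goA xs; if PySem.Int.mod x 2 ≠ 0 then (p.2.1 :: p.1, p.2.1, p.2.2 + 1)
          else (p.2.2 :: p.1, p.2.1 + 1, p.2.2)).2.1 = _) ∧ _
    by_cases h : PySem.Int.mod x 2 ≠ 0
    · simp only [goA, cntE, cntO, if_pos h, if_neg h]
      exact ⟨by rw [ih.1]; ring, by rw [ih.2]; ring⟩
    · simp only [goA, cntE, cntO, if_neg h, if_pos (not_not.mp h)]
      exact ⟨by rw [ih.1]; ring, by rw [ih.2]; ring⟩

lemma goB_eq_goA (xs : List Int) : ∀ (e o tE tO : Int),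
    tE = e + cntE xs → tO = o + cntO xs → goB tE tO xs e o = (goA xs).1 := by
  induction xs with
  | nil => intro e o tE tO _ _; rfl
  | cons x xs ih =>
    intro e o tE tO hE hO
    obtain ⟨hc1, hc2⟩ := goA_counts xs
    by_cases h : PySem.Int.mod x 2 ≠ 0
    · simp only [goA, goB, if_pos h]
      simp only [cntE, cntO, if_pos h, if_neg h] at hE hO
      have he : tE - e = (goA xs).2.1 := by rw [hc1]; omega
      rw [he, ih e (o + 1) tE tO (by omega) (by omega)]
    · simp only [goA, goB, if_neg h]
      simp only [cntE, cntO, if_pos (not_not.mp h), if_neg h] at hE hO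
      have ho : tO - o = (goA xs).2.2 := by rw [hc2]; omega
      rw [ho, ih (e + 1) o tE tO (by omega) (by omega)]

lemma foldl_cntE (xs : List Int) : ∀ (a : Int),
    xs.foldl (fun acc x => if PySem.Int.mod x 2 = 0 then acc + 1 else acc) a = a + cntE xs := by
  induction xs with
  | nil => intro a; simp [cntE]
  | cons x xs ih =>
    intro a
    simp only [List.foldl, cntE]
    by_cases h : PySem.Int.mod x 2 = 0
    · rw [if_pos h, if_pos h, ih]; ring
    · rw [if_neg h, if_neg h, ih]; ring

lemma cntE_add_cntO (xs : List Int) : cntE xs + cntO xs = (xs.length : Int) := by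
  induction xs with
  | nil => simp [cntE, cntO]
  | cons x xs ih =>
    simp only [cntE, cntO, List.length_cons]
    by_cases h : PySem.Int.mod x 2 = 0
    · rw [if_pos h, if_neg (not_not_intro h)]; push_cast; omega
    · rw [if_neg h, if_pos h]; push_cast; omega

-- ===== VERDICT (by name: the statement is the Claim_ definition above) =====
theorem countOppositeParity_spec : Claim_equal_countOppositeParity := by
  intro nums _
  unfold Spec_countOppositeParity countOppositeParity countOppositeParity_alt
  rw [foldl_cntE nums 0]
  exact (goB_eq_goA nums 0 0 _ _ (by omega) (by
    have := cntE_add_cntO nums; omega)).symm
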